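-- pv_equiv track=rewrite | github.com/dabzse/HackerRank | Algorithms/Greedy/Chief Hopper.py | chiefHopper
-- ===== SOURCE A (Python) =====
-- def chiefHopper(arr):
--     # Write your code here
--     low, high = 0, max(arr)
--
--     while low < high:
--         mid = (low + high) // 2
--         energy = mid
--
--         for h in arr:
--             if energy < h:
--                 energy -= h - energy
--             else:
--                 energy += energy - h
--             if energy < 0:
--                 break
--
--         if energy >= 0:
--             high = mid
--         else:
--             low = mid + 1
--
--     return low
-- ===== SOURCE B (Python) =====
-- def chiefHopper(arr):
--     # Backward pass: minimal energy needed before each jump; ceil((e+h)/2), clamped at 0.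
--     e = 0
--     for h in reversed(arr):
--         e = max(0, (e + h + 1) // 2)
--     return e
-- ===== Notes on version B (the rewrite author's own statement) =====
-- stated objective: faster
-- what changed: replaced A's binary search over the answer (each probe re-simulating the whole array) by a single backward pass computing the minimal required energy as e = max(0, ceil((e+h)/2))
import Mathlib
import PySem

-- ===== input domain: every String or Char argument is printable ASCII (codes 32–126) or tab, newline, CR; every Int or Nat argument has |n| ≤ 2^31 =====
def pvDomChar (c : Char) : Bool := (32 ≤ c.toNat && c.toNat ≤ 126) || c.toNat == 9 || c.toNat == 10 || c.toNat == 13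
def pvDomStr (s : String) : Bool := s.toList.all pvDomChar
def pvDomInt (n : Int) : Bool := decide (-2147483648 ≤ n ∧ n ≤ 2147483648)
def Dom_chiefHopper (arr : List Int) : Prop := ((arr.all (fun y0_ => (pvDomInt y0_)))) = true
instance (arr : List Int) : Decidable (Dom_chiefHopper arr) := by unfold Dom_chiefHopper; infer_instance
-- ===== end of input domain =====

-- B replaces A's binary search (O(n log max)) by one backward O(n) pass e := max 0 (ceil((e+h)/2)).

-- ===== PORT A =====
-- the inner 'for h in arr' loop: energy update with early break on energy < 0
def pvSimA : List Int → Int → Int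
  | [], e => e
  | h :: t, e =>
      let e' := if e < h then e - (h - e) else e + (e - h)
      if e' < 0 then e' else pvSimA t e'

-- the 'while low < high' loop
def pvLoopA (arr : List Int) (low high : Int) : Int :=
  if _hlt : low < high then
    if 0 ≤ pvSimA arr (PySem.Int.floordiv (low + high) 2) then
      pvLoopA arr low (PySem.Int.floordiv (low + high) 2)
    else
      pvLoopA arr (PySem.Int.floordiv (low + high) 2 + 1) high
  else low
termination_by (high - low).toNat
decreasing_by
  · have h := PySem.Int.floordiv_two_mid_bounds (le_of_lt _hlt)
    have h2 : PySem.Int.floordiv (low + high) 2 < high := by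
      rw [PySem.Int.floordiv_eq_ediv_of_pos (by omega)]; omega
    omega
  · have h := PySem.Int.floordiv_two_mid_bounds (le_of_lt _hlt)
    omega

def chiefHopper (arr : List Int) : Int :=
  pvLoopA arr 0 ((PySem.List.max? arr (fun x => x)).getD 0)

-- ===== PORT B =====
def chiefHopper_alt (arr : List Int) : Int :=
  arr.reverse.foldl (fun e h => max 0 (PySem.Int.floordiv (e + h + 1) 2)) 0

-- ===== PRECONDITION & SPEC =====
-- Pre_ excludes only the empty list, on which A raises ValueError (max() of empty sequence).
def Pre_chiefHopper (arr : List Int) : Prop := arr ≠ []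
instance (arr : List Int) : Decidable (Pre_chiefHopper arr) := by unfold Pre_chiefHopper; infer_instance
def pvWitness_chiefHopper : List Int := [2, 5, 1]

def Spec_chiefHopper (arr : List Int) (out : Int) : Prop := out = chiefHopper_alt arr
instance (arr : List Int) (out : Int) : Decidable (Spec_chiefHopper arr out) := by unfold Spec_chiefHopper; infer_instance

-- ===== CLAIM (what is proved, stated in full; the proofs are below) =====
def Claim_equal_chiefHopper : Prop := ∀ (arr : List Int), Dom_chiefHopper arr → Pre_chiefHopper arr → Spec_chiefHopper arr (chiefHopper arr)

-- ===== LEMMAS AND PROOFS =====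

-- proof-side recursive form of B's backward pass
def pvReq : List Int → Int
  | [] => 0
  | h :: t => max 0 ((h + pvReq t + 1) / 2)

lemma pvReq_nonneg (arr : List Int) : 0 ≤ pvReq arr := by
  cases arr <;> simp [pvReq]

lemma alt_eq_req (arr : List Int) : chiefHopper_alt arr = pvReq arr := by
  induction arr with
  | nil => rfl
  | cons h t ih =>
      unfold chiefHopper_alt pvReq
      rw [List.reverse_cons, List.foldl_append]
      unfold chiefHopper_alt at ih
      simp only [List.foldl]
      rw [ih, PySem.Int.floordiv_eq_ediv_of_pos (by norm_num : (0:Int) < 2)]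
      have : pvReq t + h + 1 = h + pvReq t + 1 := by ring
      rw [this]

-- both branches of A's inner update compute 2e - h
lemma simA_cons (h e : Int) (t : List Int) :
    pvSimA (h :: t) e = if 2 * e - h < 0 then 2 * e - h else pvSimA t (2 * e - h) := by
  show (let e' := if e < h then e - (h - e) else e + (e - h);
        if e' < 0 then e' else pvSimA t e') = _
  have : (if e < h then e - (h - e) else e + (e - h)) = 2 * e - h := by split <;> ring
  rw [this]

-- characterization: for e ≥ 0, the simulation ends nonnegative iff e ≥ pvReq arr
lemma simA_char (arr : List Int) : ∀ e : Int, 0 ≤ e → (0 ≤ pvSimA arr e ↔ pvReq arr ≤ e) := by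
  induction arr with
  | nil => intro e he; simp [pvSimA, pvReq]
  | cons h t ih =>
      intro e he
      rw [simA_cons]
      have hr := pvReq_nonneg t
      by_cases hneg : 2 * e - h < 0
      · simp only [if_pos hneg, pvReq]
        constructor
        · omega
        · intro hle; exfalso
          have : (h + pvReq t + 1) / 2 ≤ e := by omega
          omega
      · simp only [if_neg hneg, pvReq]
        rw [ih (2 * e - h) (by omega)]
        omega

-- binary search on a threshold predicate computes the clamp of pvReq into [low, high]
lemma loopA_eq (arr : List Int) (low high : Int) (h0 : 0 ≤ low) (hlh : low ≤ high) :
    pvLoopA arr low high = max low (min high (pvReq arr)) := by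
  rw [pvLoopA]
  split_ifs with hlt hfe
  · have hb := PySem.Int.floordiv_two_mid_bounds (le_of_lt hlt)
    have h2 : PySem.Int.floordiv (low + high) 2 < high := by
      rw [PySem.Int.floordiv_eq_ediv_of_pos (by norm_num : (0:Int) < 2)]; omega
    have hc := (simA_char arr (PySem.Int.floordiv (low + high) 2) (by omega)).mp hfe
    rw [loopA_eq arr low _ h0 (by omega)]
    omega
  · have hb := PySem.Int.floordiv_two_mid_bounds (le_of_lt hlt)
    have h2 : PySem.Int.floordiv (low + high) 2 < high := by
      rw [PySem.Int.floordiv_eq_ediv_of_pos (by norm_num : (0:Int) < 2)]; omega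
    have hc : ¬ pvReq arr ≤ PySem.Int.floordiv (low + high) 2 := fun hle => hfe
      ((simA_char arr _ (by omega)).mpr hle)
    rw [loopA_eq arr _ high (by omega) (by omega)]
    omega
  · omega
termination_by (high - low).toNat
decreasing_by
  · have hb := PySem.Int.floordiv_two_mid_bounds (le_of_lt hlt)
    have h2 : PySem.Int.floordiv (low + high) 2 < high := by
      rw [PySem.Int.floordiv_eq_ediv_of_pos (by norm_num : (0:Int) < 2)]; omega
    omega
  · have hb := PySem.Int.floordiv_two_mid_bounds (le_of_lt hlt)
    omega

-- starting at c ≥ 0 with every element ≤ c, the simulation stays nonnegative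
lemma simA_of_max (arr : List Int) : ∀ e c : Int, 0 ≤ c → c ≤ e → (∀ h ∈ arr, h ≤ c) →
    0 ≤ pvSimA arr e := by
  induction arr with
  | nil => intro e c hc hce _; simpa [pvSimA] using le_trans hc hce
  | cons h t ih =>
      intro e c hc hce hall
      rw [simA_cons]
      have hh : h ≤ c := hall h (by simp)
      have : ¬ (2 * e - h < 0) := by omega
      rw [if_neg this]
      exact ih (2 * e - h) c hc (by omega) (fun x hx => hall x (by simp [hx]))

-- if every element is negative the requirement is 0
lemma req_zero_of_neg (arr : List Int) (hall : ∀ h ∈ arr, h < 0) : pvReq arr = 0 := by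
  induction arr with
  | nil => rfl
  | cons h t ih =>
      have hh : h < 0 := hall h (by simp)
      rw [pvReq, ih (fun x hx => hall x (by simp [hx]))]
      have : (h + 0 + 1) / 2 ≤ 0 := by omega
      omega

-- ===== VERDICT (by name: the statement is the Claim_ definition above) =====
theorem chiefHopper_spec : Claim_equal_chiefHopper := by
  intro arr _ hpre
  unfold Spec_chiefHopper chiefHopper
  rw [alt_eq_req]
  obtain ⟨m, hm⟩ : ∃ m, PySem.List.max? arr (fun x => x) = some m := by
    cases hx : PySem.List.max? arr (fun x => x) with
    | none => exact absurd (Iff.mp (PySem.List.max?_eq_none_iff arr (fun x => x)) hx) hpre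
    | some m => exact ⟨m, rfl⟩
  have hmax : ∀ y ∈ arr, y ≤ m := fun y hy => PySem.List.max?_isMax hm y hy
  rw [hm]
  simp only [Option.getD_some]
  by_cases hm0 : 0 ≤ m
  · rw [loopA_eq arr 0 m le_rfl hm0]
    have hreq : pvReq arr ≤ m := by
      rw [← simA_char arr m hm0]
      exact simA_of_max arr m m hm0 le_rfl hmax
    have := pvReq_nonneg arr
    omega
  · rw [pvLoopA, dif_neg (by omega : ¬ (0:Int) < m)]
    exact (req_zero_of_neg arr (fun h hh => by have := hmax h hh; omega)).symm
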